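-- pv_equiv track=rewrite | github.com/LevapTon/Study | 3_курс/Методы оптимизации/LabRab_4/test2.py | getStartPlan
-- ===== SOURCE A (Python) =====
-- def getStartPlan(a, b):
--     '''
--     Получение начального базиса
--     методом северо-западного угла.
--
--     a – Объем производства
--
--     b – Объем потребления
--     '''
--     X = []
--     for i in range(len(a)):
--         raw = []
--         for j in range(len(b)):
--             if b[j] == 0:
--                 raw.append(0)
--                 continue
--             if a[i] == 0:
--                 for _ in range(j, len(b)):
--                     raw.append(0)
--                 break
--             cur = min(b[j], a[i])
--             a[i] -= cur
--             b[j] -= cur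
--             raw.append(cur)
--         X.append(raw)
--     return X
-- ===== SOURCE B (Python) =====
-- def getStartPlan(a, b):
--     '''Northwest-corner initial basis: single two-pointer staircase walk
--     over a zero-initialized grid (mutates a and b in place, like the original).'''
--     n, m = len(a), len(b)
--     X = [[0] * m for _ in range(n)]
--     i = j = 0
--     while i < n and j < m:
--         if b[j] == 0:
--             j += 1
--         elif a[i] == 0:
--             i += 1
--         else:
--             cur = min(a[i], b[j])
--             a[i] -= cur
--             b[j] -= cur
--             X[i][j] = cur
--             if a[i] == 0:
--                 i += 1
--             else:
--                 j += 1
--     return X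
-- ===== Notes on version B (the rewrite author's own statement) =====
-- stated objective: simpler
-- what changed: Replaced A's nested per-row/per-cell loops (which re-scan every exhausted column of b for every row and re-build each row with appends and a break) by a single two-pointer staircase walk over a pre-allocated zero grid: one while loop advances i when a[i] is exhausted and j when b[j] is, touching each cell of the staircase once.
import Mathlib
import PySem

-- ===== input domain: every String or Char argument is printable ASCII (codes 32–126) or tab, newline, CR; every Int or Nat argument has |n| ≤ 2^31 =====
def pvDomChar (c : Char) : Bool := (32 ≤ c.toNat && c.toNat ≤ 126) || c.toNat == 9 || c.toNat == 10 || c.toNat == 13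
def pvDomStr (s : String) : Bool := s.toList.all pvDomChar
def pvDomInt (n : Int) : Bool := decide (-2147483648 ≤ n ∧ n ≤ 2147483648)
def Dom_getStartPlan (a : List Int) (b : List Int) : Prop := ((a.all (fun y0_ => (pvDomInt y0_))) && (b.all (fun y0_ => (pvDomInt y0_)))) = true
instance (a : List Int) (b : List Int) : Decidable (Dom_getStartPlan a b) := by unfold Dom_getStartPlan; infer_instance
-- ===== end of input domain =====

-- B replaces A's nested per-cell row loop by a single two-pointer staircase walk over a
-- zero-initialized grid (objective: simpler).  Both A and B mutate the argument lists a and b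
-- in place identically; the equivalence proved here is about the return value.

-- ===== PORT A =====
-- inner loop of A over one row: state is a[i] (ai) and the remaining b entries;
-- returns (raw, new b-suffix, new a[i]).  The 'break' with zero-fill is the middle branch.
def innerA (ai : Int) (bs : List Int) : List Int × List Int × Int :=
  match bs with
  | [] => ([], [], ai)
  | bj :: rest =>
    if bj = 0 then
      let r := innerA ai rest
      (0 :: r.1, 0 :: r.2.1, r.2.2)
    else if ai = 0 then
      (List.replicate (rest.length + 1) 0, bj :: rest, ai)
    else
      let cur := min bj ai
      let r := innerA (ai - cur) rest
      (cur :: r.1, (bj - cur) :: r.2.1, r.2.2)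

-- outer loop of A over the rows, threading the mutated b
def rowsA : List Int → List Int → List (List Int)
  | [], _ => []
  | ai :: rest, bs =>
    let r := innerA ai bs
    r.1 :: rowsA rest r.2.1

def getStartPlan (a : List Int) (b : List Int) : List (List Int) := rowsA a b

-- ===== PORT B =====
-- B's while-loop: indices i, j over the mutable lists a, b and the grid X.
-- The fuel argument is only a structural totality guard: every iteration decreases
-- (n-i)+(m-j), so fuel n+m+1 from (0,0) never runs out.
def loopB : Nat → Nat → Nat → Nat → Nat → List Int → List Int → List (List Int) → List (List Int)
  | 0, _, _, _, _, _, _, X => X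
  | fuel+1, n, m, i, j, a, b, X =>
    if i < n ∧ j < m then
      if b.getD j 0 = 0 then loopB fuel n m i (j+1) a b X
      else if a.getD i 0 = 0 then loopB fuel n m (i+1) j a b X
      else
        let cur := min (a.getD i 0) (b.getD j 0)
        let a' := a.set i (a.getD i 0 - cur)
        let b' := b.set j (b.getD j 0 - cur)
        let X' := X.modify i (fun row => row.set j cur)
        if a.getD i 0 - cur = 0 then loopB fuel n m (i+1) j a' b' X'
        else loopB fuel n m i (j+1) a' b' X'
    else X

def getStartPlan_alt (a : List Int) (b : List Int) : List (List Int) :=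
  loopB (a.length + b.length + 1) a.length b.length 0 0 a b
    (List.replicate a.length (List.replicate b.length 0))

-- ===== PRECONDITION & SPEC =====
def Spec_getStartPlan (a : List Int) (b : List Int) (out : List (List Int)) : Prop := out = getStartPlan_alt a b
instance (a : List Int) (b : List Int) (out : List (List Int)) : Decidable (Spec_getStartPlan a b out) := by unfold Spec_getStartPlan; infer_instance

-- ===== CLAIM (what is proved, stated in full; the proofs are below) =====
def Claim_equal_getStartPlan : Prop := ∀ (a : List Int) (b : List Int), Dom_getStartPlan a b → Spec_getStartPlan a b (getStartPlan a b)

-- ===== LEMMAS AND PROOFS =====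

-- a[i] = 0: the whole remaining row is zero-filled and b is unchanged
theorem innerA_zero (bs : List Int) : innerA 0 bs = (List.replicate bs.length 0, bs, 0) := by
  induction bs with
  | nil => rfl
  | cons bj rest ih =>
    simp only [innerA]
    by_cases h : bj = 0
    · subst h; simp [ih, List.replicate_succ]
    · simp [h, List.replicate_succ]

-- a zero prefix of b passes through innerA unchanged, contributing zeros to the row
theorem innerA_zero_prefix (j : Nat) (ai : Int) (bs : List Int) :
    innerA ai (List.replicate j 0 ++ bs) =
      (List.replicate j 0 ++ (innerA ai bs).1,
       List.replicate j 0 ++ (innerA ai bs).2.1,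
       (innerA ai bs).2.2) := by
  induction j with
  | zero => simp
  | succ k ih => simp [List.replicate_succ, innerA, ih]

-- when b is all zeros every remaining row of A is all zeros
theorem rowsA_zero_b (m : Nat) (as : List Int) :
    rowsA as (List.replicate m 0) = as.map (fun _ => List.replicate m 0) := by
  induction as with
  | nil => rfl
  | cons ai rest ih =>
    have h := innerA_zero_prefix m ai []
    simp only [List.append_nil, innerA] at h
    simp [rowsA, h, ih]

-- the tail of the result from row i on: the current (partially filled) row i, then A's rows
def tailSpec (j : Nat) (as bs rowi : List Int) : List (List Int) :=
  match as with
  | [] => []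
  | ai :: rest =>
    (rowi.take j ++ (innerA ai (bs.drop j)).1) ::
      rowsA rest (bs.take j ++ (innerA ai (bs.drop j)).2.1)

-- when b starts with j zeros, processing rows from scratch agrees with tailSpec on all-zero rows
theorem rowsA_split (j : Nat) (as bs : List Int) (hb : bs.take j = List.replicate j 0) :
    rowsA as bs = tailSpec j as bs (List.replicate bs.length 0) := by
  cases as with
  | nil => rfl
  | cons ai rest =>
    have hbs : bs = List.replicate j 0 ++ bs.drop j := by
      conv_lhs => rw [← List.take_append_drop j bs]; rw [hb]
    have h1 : innerA ai bs =
        (List.replicate j 0 ++ (innerA ai (bs.drop j)).1,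
         List.replicate j 0 ++ (innerA ai (bs.drop j)).2.1,
         (innerA ai (bs.drop j)).2.2) := by
      conv_lhs => rw [hbs]
      exact innerA_zero_prefix j ai (bs.drop j)
    have hjle : j ≤ bs.length := by
      have := congrArg List.length hb
      simp at this; omega
    simp only [rowsA, tailSpec, h1, hb, List.take_replicate]
    rw [Nat.min_eq_left hjle]

theorem tailSpec_nil (j : Nat) (bs rowi : List Int) : tailSpec j [] bs rowi = [] := rfl

theorem tailSpec_cons (j : Nat) (ai : Int) (rest bs rowi : List Int) :
    tailSpec j (ai :: rest) bs rowi =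
      (rowi.take j ++ (innerA ai (bs.drop j)).1) ::
        rowsA rest (bs.take j ++ (innerA ai (bs.drop j)).2.1) := rfl

theorem getD_modify_ne (X : List (List Int)) (i i' : Nat) (f : List Int → List Int)
    (h : i ≠ i') : (X.modify i f).getD i' [] = X.getD i' [] := by
  by_cases hlt : i' < X.length
  · rw [List.getD_eq_getElem _ _ (by simpa using hlt), List.getD_eq_getElem _ _ hlt,
      List.getElem_modify, if_neg h]
  · rw [List.getD_eq_default _ _ (by simp; omega), List.getD_eq_default _ _ (by omega)]

theorem getD_modify_self (X : List (List Int)) (i : Nat) (f : List Int → List Int)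
    (h : i < X.length) : (X.modify i f).getD i [] = f (X.getD i []) := by
  rw [List.getD_eq_getElem _ _ (by simpa using h), List.getD_eq_getElem _ _ h,
    List.getElem_modify, if_pos rfl]

-- decomposition of X when all rows after i are untouched zero rows
theorem X_decomp (X : List (List Int)) (i m : Nat) (rest : List Int)
    (hin : i < X.length) (hrest : rest.length = X.length - (i + 1))
    (hrows : ∀ i', i < i' → i' < X.length → X.getD i' [] = List.replicate m 0) :
    X = X.take i ++ X.getD i [] :: rest.map (fun _ => List.replicate m 0) := by
  conv_lhs => rw [← List.take_append_drop i X, List.drop_eq_getElem_cons hin]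
  congr 1
  rw [List.getD_eq_getElem _ _ hin]
  congr 1
  apply List.ext_getElem
  · simp; omega
  · intro k hk1 hk2
    have hk : i + 1 + k < X.length := by simp at hk1; omega
    rw [List.getElem_drop, List.getElem_map,
      ← List.getD_eq_getElem X [] hk, hrows _ (by omega) hk]

theorem main_loopB : ∀ (N i j : Nat) (a b : List Int) (X : List (List Int)),
    (a.length - i) + (b.length - j) ≤ N →
    i ≤ a.length → j ≤ b.length →
    X.length = a.length →
    (∀ i', i ≤ i' → i' < a.length → (X.getD i' []).length = b.length) →
    b.take j = List.replicate j 0 →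
    (i < a.length → (X.getD i []).drop j = List.replicate (b.length - j) 0) →
    (∀ i', i < i' → i' < a.length → X.getD i' [] = List.replicate b.length 0) →
    loopB N a.length b.length i j a b X =
      X.take i ++ tailSpec j (a.drop i) b (X.getD i []) := by
  intro N
  induction N with
  | zero =>
    intro i j a b X hm hi hj hXl hrow hbpre hrowi hrows
    have hi' : i = a.length := by omega
    rw [loopB]
    rw [hi', List.drop_length]
    rw [tailSpec_nil, List.append_nil, List.take_of_length_le (by omega)]
  | succ k ih =>
    intro i j a b X hm hi hj hXl hrow hbpre hrowi hrows
    rw [loopB]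
    by_cases hin : i < a.length
    · by_cases hjm : j < b.length
      · -- loop body
        rw [if_pos (show i < a.length ∧ j < b.length from ⟨hin, hjm⟩)]
        have hbD : b.getD j 0 = b[j] := List.getD_eq_getElem b 0 hjm
        have haD : a.getD i 0 = a[i] := List.getD_eq_getElem a 0 hin
        have hXiLen : (X.getD i []).length = b.length := hrow i le_rfl hin
        have hXidrop : (X.getD i []).drop j = List.replicate (b.length - j) 0 := hrowi hin
        have hXij? : (X.getD i [])[j]? = some 0 := by
          have h1 : ((X.getD i []).drop j)[0]? = (X.getD i [])[j]? := by
            simp [List.getElem?_drop]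
          rw [← h1, hXidrop, List.getElem?_replicate, if_pos (by omega : 0 < b.length - j)]
        have hXidrop1 : (X.getD i []).drop (j+1) = List.replicate (b.length - (j+1)) 0 := by
          rw [show j + 1 = j + 1 from rfl, ← List.drop_drop, hXidrop, List.drop_replicate]
          congr 1
        have hadrop : a.drop i = a[i] :: a.drop (i+1) := List.drop_eq_getElem_cons hin
        have hbdrop : b.drop j = b[j] :: b.drop (j+1) := List.drop_eq_getElem_cons hjm
        have hbtake : b.take (j+1) = b.take j ++ [b[j]] := by
          rw [List.take_add_one, List.getElem?_eq_getElem hjm]; rfl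
        have hXitake : (X.getD i []).take (j+1) = (X.getD i []).take j ++ [(0:Int)] := by
          rw [List.take_add_one, hXij?]; rfl
        by_cases hbj : b[j] = 0
        · -- skip a zero column
          rw [hbD, if_pos hbj]
          rw [ih i (j+1) a b X (by omega) (by omega) (by omega) hXl hrow
            (by rw [hbtake, hbj, hbpre, ← List.replicate_succ'])
            (fun _ => hXidrop1)
            hrows]
          rw [hadrop]
          simp only [tailSpec_cons]
          rw [hbdrop, hbj, hXitake, hbtake, hbj]
          simp only [innerA, if_true]
          simp [List.append_assoc]
        · by_cases haj : a[i] = 0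
          · -- exhausted row: advance i
            rw [hbD, if_neg hbj, haD, if_pos haj]
            rw [ih (i+1) j a b X (by omega) (by omega) hj hXl
              (fun i' h1 h2 => hrow i' (by omega) h2)
              hbpre
              (by intro h1; rw [hrows (i+1) (by omega) h1, List.drop_replicate])
              (fun i' h1 h2 => hrows i' (by omega) h2)]
            rw [hadrop]
            simp only [tailSpec_cons]
            rw [haj, innerA_zero, List.length_drop]
            dsimp only
            rw [show List.take j (X.getD i []) ++ List.replicate (b.length - j) 0
                = X.getD i [] from by rw [← hXidrop, List.take_append_drop]]
            rw [List.take_append_drop]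
            have htake1 : List.take (i+1) X = List.take i X ++ [X.getD i []] := by
              rw [List.take_add_one, List.getElem?_eq_getElem (by omega : i < X.length),
                ← List.getD_eq_getElem X [] (by omega)]
              rfl
            rw [htake1]
            by_cases h1 : i + 1 < a.length
            · rw [hrows (i+1) (by omega) h1, ← rowsA_split j _ b hbpre]
              simp
            · rw [List.drop_eq_nil_of_le (by omega : a.length ≤ i + 1)]
              simp [tailSpec, rowsA]
          · -- update branch
            simp only [hbD, haD, if_neg hbj, if_neg haj]
            rw [min_comm a[i] b[j]]
            have hinX : i < X.length := by omega
            have hjX : j < (X.getD i []).length := by omega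
            have hInner : innerA a[i] (List.drop j b)
                = (min b[j] a[i] :: (innerA (a[i] - min b[j] a[i]) (List.drop (j+1) b)).1,
                   (b[j] - min b[j] a[i]) :: (innerA (a[i] - min b[j] a[i]) (List.drop (j+1) b)).2.1,
                   (innerA (a[i] - min b[j] a[i]) (List.drop (j+1) b)).2.2) := by
              rw [hbdrop]
              simp only [innerA, if_neg hbj, if_neg haj]
            set cur := min b[j] a[i] with hcurdef
            have hb'take : (b.set j (b[j] - cur)).take j = List.replicate j 0 := by
              rw [List.take_set, List.set_eq_of_length_le (by rw [List.length_take]; omega), hbpre]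
            have hX'take : (X.modify i (fun row => row.set j cur)).take i = List.take i X := by
              rw [List.take_modify, List.modify_eq_self (by rw [List.length_take]; omega)]
            by_cases hc : a[i] - cur = 0
            · -- a[i] exhausted: advance i
              rw [if_pos hc]
              rw [show a.length = (a.set i (a[i] - cur)).length from List.length_set.symm,
                  show b.length = (b.set j (b[j] - cur)).length from List.length_set.symm]
              rw [ih (i+1) j (a.set i (a[i] - cur)) (b.set j (b[j] - cur))
                  (X.modify i (fun row => row.set j cur))
                (by simp only [List.length_set]; omega)
                (by simp only [List.length_set]; omega)
                (by simp only [List.length_set]; omega)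
                (by simp only [List.length_modify, List.length_set]; omega)
                (by intro i' h1' h2'
                    rw [getD_modify_ne X i i' _ (by omega), List.length_set]
                    exact hrow i' (by omega) (by simpa using h2'))
                hb'take
                (by intro h'
                    rw [getD_modify_ne X i (i+1) _ (by omega),
                      hrows (i+1) (by omega) (by simpa using h'),
                      List.drop_replicate, List.length_set])
                (by intro i' h1' h2'
                    rw [getD_modify_ne X i i' _ (by omega), List.length_set]
                    exact hrows i' (by omega) (by simpa using h2'))]
              -- now both sides are loop-free; reconcile
              have htakeX' : (X.modify i (fun row => row.set j cur)).take (i+1)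
                  = List.take i X ++ [(X.getD i []).set j cur] := by
                rw [List.take_add_one, List.getElem?_eq_getElem (by simpa using hinX), hX'take]
                rw [show ((X.modify i (fun row => row.set j cur))[i]'(by simpa using hinX))
                    = (X.getD i []).set j cur from by
                  rw [List.getElem_modify, if_pos rfl, ← List.getD_eq_getElem X [] hinX]]
                rfl
              have hadrop' : (a.set i (a[i] - cur)).drop (i+1) = a.drop (i+1) := by
                rw [List.drop_set, if_pos (by omega)]
              rw [htakeX', hadrop']
              rw [hadrop, tailSpec_cons, hInner]
              dsimp only
              rw [hc, innerA_zero]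
              dsimp only
              rw [← List.set_eq_take_cons_drop (b[j] - cur) hjm]
              rw [show (X.getD i []).set j cur
                  = List.take j (X.getD i []) ++ cur :: List.replicate ((List.drop (j+1) b).length) 0 from by
                rw [List.set_eq_take_cons_drop cur hjX, hXidrop1, List.length_drop]]
              by_cases h1 : i + 1 < a.length
              · rw [getD_modify_ne X i (i+1) _ (by omega), hrows (i+1) (by omega) h1]
                rw [show List.replicate b.length (0:Int)
                    = List.replicate (b.set j (b[j] - cur)).length 0 from by rw [List.length_set]]
                rw [← rowsA_split j _ _ hb'take]
                simp
              · rw [List.drop_eq_nil_of_le (by omega : a.length ≤ i + 1)]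
                simp [tailSpec_nil, rowsA]
            · -- b[j] exhausted: advance j
              rw [if_neg hc]
              have hbc : b[j] - cur = 0 := by
                rcases min_choice b[j] a[i] with h' | h' <;> omega
              have hb'takes : (b.set j (b[j] - cur)).take (j+1) = List.take j b ++ [(0:Int)] := by
                rw [List.take_add_one, List.getElem?_eq_getElem (by rw [List.length_set]; omega)]
                rw [List.take_set, List.set_eq_of_length_le (by rw [List.length_take]; omega)]
                rw [show ((b.set j (b[j] - cur))[j]'(by rw [List.length_set]; omega) : Int) = 0 from by
                  rw [List.getElem_set_self]; exact hbc]
                rfl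
              rw [show a.length = (a.set i (a[i] - cur)).length from List.length_set.symm,
                  show b.length = (b.set j (b[j] - cur)).length from List.length_set.symm]
              rw [ih i (j+1) (a.set i (a[i] - cur)) (b.set j (b[j] - cur))
                  (X.modify i (fun row => row.set j cur))
                (by simp only [List.length_set]; omega)
                (by simp only [List.length_set]; omega)
                (by simp only [List.length_set]; omega)
                (by simp only [List.length_modify, List.length_set]; omega)
                (by intro i' h1' h2'
                    rcases Nat.eq_or_lt_of_le h1' with h3 | h3
                    · subst h3
                      rw [getD_modify_self X i _ hinX, List.length_set, List.length_set]
                      exact hXiLen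
                    · rw [getD_modify_ne X i i' _ (by omega), List.length_set]
                      exact hrow i' (by omega) (by simpa using h2'))
                (by rw [hb'takes, hbpre, ← List.replicate_succ'])
                (by intro h'
                    rw [getD_modify_self X i _ hinX, List.drop_set, if_pos (by omega),
                      hXidrop1, List.length_set])
                (by intro i' h1' h2'
                    rw [getD_modify_ne X i i' _ (by omega), List.length_set]
                    exact hrows i' (by omega) (by simpa using h2'))]
              rw [hX'take]
              have hadrop'' : (a.set i (a[i] - cur)).drop i = (a[i] - cur) :: a.drop (i+1) := by
                rw [List.drop_set, if_neg (lt_irrefl i), Nat.sub_self, hadrop]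
                rfl
              rw [hadrop'', tailSpec_cons, getD_modify_self X i _ hinX]
              rw [hadrop, tailSpec_cons, hInner]
              dsimp only
              have hXsettake : ((X.getD i []).set j cur).take (j+1)
                  = List.take j (X.getD i []) ++ [cur] := by
                rw [List.take_add_one, List.getElem?_eq_getElem (by rw [List.length_set]; omega)]
                rw [List.take_set, List.set_eq_of_length_le (by rw [List.length_take]; omega)]
                rw [List.getElem_set_self]
                rfl
              rw [hXsettake, hb'takes]
              rw [show (b.set j (b[j] - cur)).drop (j+1) = b.drop (j+1) from by
                rw [List.drop_set, if_pos (by omega)]]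
              rw [hbc]
              simp [List.append_assoc]
      · -- exit: j = b.length, all of b is zero
        rw [if_neg (by omega : ¬(i < a.length ∧ j < b.length))]
        have hj' : j = b.length := by omega
        subst hj'
        rw [List.drop_eq_getElem_cons hin, tailSpec_cons, List.drop_length]
        simp only [innerA]
        rw [List.append_nil, List.append_nil, List.take_length,
          List.take_of_length_le (le_of_eq (hrow i le_rfl hin))]
        have hball : b = List.replicate b.length 0 := by
          rw [← hbpre, List.take_length]
        rw [show rowsA (List.drop (i+1) a) b
            = (List.drop (i+1) a).map (fun _ => List.replicate b.length 0) from by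
          conv_lhs => rw [hball]
          rw [rowsA_zero_b]]
        exact X_decomp X i b.length (List.drop (i+1) a) (by omega)
          (by rw [List.length_drop]; omega)
          (fun i' h1 h2 => hrows i' h1 (by omega))
    · -- exit: i = a.length
      rw [if_neg (by omega : ¬(i < a.length ∧ j < b.length))]
      have hi' : i = a.length := by omega
      rw [hi', List.drop_length]
      rw [tailSpec_nil, List.append_nil, List.take_of_length_le (by omega)]

-- ===== VERDICT (by name: the statement is the Claim_ definition above) =====
theorem getStartPlan_spec : Claim_equal_getStartPlan := by
  intro a b _
  unfold Spec_getStartPlan getStartPlan getStartPlan_alt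
  have h := main_loopB (a.length + b.length + 1) 0 0 a b
      (List.replicate a.length (List.replicate b.length 0))
      (by omega) (by omega) (by omega) (by simp)
      (by intro i' _ hi'; simp [List.getD_eq_getElem?_getD, hi'])
      (by simp)
      (by intro hi; simp [List.getD_eq_getElem?_getD, hi])
      (by intro i' _ hi'; simp [List.getD_eq_getElem?_getD, hi'])
  rw [h]
  cases a with
  | nil => rfl
  | cons ai rest =>
    simp [rowsA, tailSpec, List.getD_eq_getElem?_getD]
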